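-- pv_equiv track=rewrite | github.com/pypi-data/pypi-mirror-59 | packages/meta_sphinx/meta_sphinx-0.1.8.tar.gz/meta_sphinx-0.1.8/src/meta_sphinx/jinja.py | prefix_lines
-- ===== SOURCE A (Python) =====
-- def prefix_lines(text, prefix, first=False):
--     lines = text.split("\n")
--     new_lines = []
--     if first:
--         new_lines.append(prefix + lines.pop(0))
--     else:
--         new_lines.append(lines.pop(0))
--     new_lines.extend(prefix + line for line in lines)
--     return "\n".join(new_lines)
-- ===== SOURCE B (Python) =====
-- def prefix_lines(text, prefix, first=False):
--     result = text.replace("\n", "\n" + prefix)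
--     if first:
--         result = prefix + result
--     return result
-- ===== Notes on version B (the rewrite author's own statement) =====
-- stated objective: simpler
-- what changed: Replaces the split/pop/generator/join pipeline with a single str.replace of each newline by newline+prefix (plus one concatenation for the first line), with no intermediate list.
import Mathlib
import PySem

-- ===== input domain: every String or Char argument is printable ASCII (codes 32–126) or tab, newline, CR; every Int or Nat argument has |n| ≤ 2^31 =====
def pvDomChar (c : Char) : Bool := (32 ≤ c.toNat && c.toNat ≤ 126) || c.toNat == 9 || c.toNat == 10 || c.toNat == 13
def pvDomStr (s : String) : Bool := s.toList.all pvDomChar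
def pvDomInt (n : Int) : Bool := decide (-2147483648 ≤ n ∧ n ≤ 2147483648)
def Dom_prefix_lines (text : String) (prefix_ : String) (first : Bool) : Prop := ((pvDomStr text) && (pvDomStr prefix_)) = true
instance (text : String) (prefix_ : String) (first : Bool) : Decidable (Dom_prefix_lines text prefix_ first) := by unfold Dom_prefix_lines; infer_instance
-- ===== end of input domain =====

-- B computes the same string with one str.replace of "\n" by "\n"+prefix (plus one concatenation
-- when first=True) instead of A's split / pop / per-line generator / join pipeline (objective: simpler).

-- ===== PORT A =====
-- text.split("\n") always yields a non-empty list, so lines.pop(0) never raises;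
-- the `| _ => ""` branch is unreachable (split? with a non-empty separator is `some` and non-empty).
def prefix_lines (text : String) (prefix_ : String) (first : Bool) : String :=
  match PySem.Str.split? text "\n" with
  | some (l0 :: rest) =>
      let new_lines : List String :=
        (if first then prefix_ ++ l0 else l0) :: rest.map (fun line => prefix_ ++ line)
      PySem.Str.join "\n" new_lines
  | _ => ""

-- ===== PORT B =====
def prefix_lines_alt (text : String) (prefix_ : String) (first : Bool) : String :=
  let result := PySem.Str.replace text "\n" ("\n" ++ prefix_)
  if first then prefix_ ++ result else result

-- ===== PRECONDITION & SPEC =====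
def Spec_prefix_lines (text : String) (prefix_ : String) (first : Bool) (out : String) : Prop := out = prefix_lines_alt text prefix_ first
instance (text : String) (prefix_ : String) (first : Bool) (out : String) : Decidable (Spec_prefix_lines text prefix_ first out) := by unfold Spec_prefix_lines; infer_instance

-- ===== CLAIM (what is proved, stated in full; the proofs are below) =====
def Claim_equal_prefix_lines : Prop := ∀ (text : String) (prefix_ : String) (first : Bool), Dom_prefix_lines text prefix_ first → Spec_prefix_lines text prefix_ first (prefix_lines text prefix_ first)

-- ===== LEMMAS AND PROOFS =====

-- structural spec of splitting at '\n': (first piece, remaining pieces)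
def pvSplitNl : List Char → List Char × List (List Char)
  | [] => ([], [])
  | c :: t =>
      let r := pvSplitNl t
      if c = '\n' then ([], r.1 :: r.2) else (c :: r.1, r.2)

theorem pvReplaceGo_spec (nw : List Char) :
    ∀ (fuel : Nat) (l acc : List Char), l.length ≤ fuel →
      PySem.Chars.replace.go ['\n'] nw fuel l acc
        = acc.reverse ++ l.flatMap (fun c => if c = '\n' then nw else [c]) := by
  intro fuel
  induction fuel with
  | zero =>
      intro l acc h
      have : l = [] := List.length_eq_zero_iff.mp (Nat.le_zero.mp h)
      subst this; simp [PySem.Chars.replace.go]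
  | succ n ih =>
      intro l acc h
      cases l with
      | nil => simp [PySem.Chars.replace.go]
      | cons c t =>
          simp only [PySem.Chars.replace.go]
          by_cases hc : c = '\n'
          · subst hc
            simp only [List.isPrefixOf, BEq.rfl, Bool.true_and,
              if_pos, List.length_cons] at *
            rw [show List.drop (List.length ([] : List Char) + 1) ('\n' :: t) = t from rfl]
            rw [ih t (nw.reverse ++ acc) (by omega)]
            simp
          · have : List.isPrefixOf ['\n'] (c :: t) = false := by
              simp [List.isPrefixOf]
              exact fun hh => absurd hh.symm hc
            rw [this]
            simp only [Bool.false_eq_true, if_neg, not_false_iff]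
            rw [ih t (c :: acc) (by simpa using Nat.succ_le_succ_iff.mp h)]
            simp [hc]

theorem pvReplace_spec (s nw : List Char) :
    PySem.Chars.replace s ['\n'] nw
      = s.flatMap (fun c => if c = '\n' then nw else [c]) := by
  simp only [PySem.Chars.replace, List.isEmpty_cons, Bool.false_eq_true, if_neg, not_false_iff]
  exact pvReplaceGo_spec nw s.length s [] (le_refl _)

theorem pvSplitGo_spec :
    ∀ (fuel : Nat) (l cur : List Char) (accs : List (List Char)), l.length < fuel →
      PySem.Chars.splitOn.go ['\n'] fuel l cur accs
        = accs.reverse ++ (cur.reverse ++ (pvSplitNl l).1) :: (pvSplitNl l).2 := by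
  intro fuel
  induction fuel with
  | zero => intro l cur accs h; omega
  | succ n ih =>
      intro l cur accs h
      cases l with
      | nil => simp [PySem.Chars.splitOn.go, pvSplitNl]
      | cons c t =>
          simp only [PySem.Chars.splitOn.go]
          by_cases hc : c = '\n'
          · subst hc
            simp only [List.isPrefixOf, BEq.rfl, Bool.true_and, if_pos, List.length_cons] at *
            rw [show List.drop (List.length ([] : List Char) + 1) ('\n' :: t) = t from rfl]
            rw [ih t [] (cur.reverse :: accs) (by omega)]
            simp [pvSplitNl]
          · have hp : List.isPrefixOf ['\n'] (c :: t) = false := by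
              simp [List.isPrefixOf]
              exact fun hh => absurd hh.symm hc
            rw [hp]
            simp only [Bool.false_eq_true, if_neg, not_false_iff]
            rw [ih t (c :: cur) accs (by simpa using Nat.succ_lt_succ_iff.mp h)]
            simp [pvSplitNl, hc]

theorem pvSplitOn_spec (s : List Char) :
    PySem.Chars.splitOn s ['\n'] = (pvSplitNl s).1 :: (pvSplitNl s).2 := by
  have := pvSplitGo_spec (s.length + 1) s [] [] (by omega)
  simpa [PySem.Chars.splitOn] using this

theorem pvCore (l p : List Char) :
    (pvSplitNl l).1 ++ (pvSplitNl l).2.flatMap (fun piece => '\n' :: (p ++ piece))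
      = l.flatMap (fun c => if c = '\n' then '\n' :: p else [c]) := by
  induction l with
  | nil => simp [pvSplitNl]
  | cons c t ih =>
      by_cases hc : c = '\n'
      · subst hc; simp [pvSplitNl, ← ih]
      · simp [pvSplitNl, hc, ← ih]

theorem pvJoin_cons (h : List Char) (ts : List (List Char)) (sep : List Char) :
    PySem.Chars.join sep (h :: ts) = h ++ ts.flatMap (sep ++ ·) := by
  induction ts generalizing h with
  | nil => simp [PySem.Chars.join, List.intercalate]
  | cons t ts ih =>
      rw [PySem.Chars.join_cons_cons, ih]
      simp [List.flatMap_cons]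

-- ===== VERDICT (by name: the statement is the Claim_ definition above) =====
theorem prefix_lines_spec : Claim_equal_prefix_lines := by
  intro text prefix_ first _
  unfold Spec_prefix_lines prefix_lines prefix_lines_alt
  have hsplit : PySem.Str.split? text "\n"
      = some (String.ofList ((pvSplitNl text.toList).1)
          :: ((pvSplitNl text.toList).2).map String.ofList) := by
    simp [PySem.Str.split?, PySem.Chars.split?, show ("\n" : String).toList = ['\n'] from rfl,
      pvSplitOn_spec]
  rw [hsplit]
  apply String.toList_inj.mp
  have hrep : (PySem.Str.replace text "\n" ("\n" ++ prefix_)).toList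
      = text.toList.flatMap (fun c => if c = '\n' then '\n' :: prefix_.toList else [c]) := by
    simp only [PySem.Str.replace, String.toList_ofList]
    rw [show ("\n" : String).toList = ['\n'] from rfl,
        show (("\n" ++ prefix_) : String).toList = '\n' :: prefix_.toList from by
          simp [String.toList_append]]
    exact pvReplace_spec _ _
  cases first with
  | false =>
      simp only [if_neg, Bool.false_eq_true, not_false_iff]
      simp only [PySem.Str.join, String.toList_ofList, List.map_cons, List.map_map, hrep]
      rw [pvJoin_cons]
      rw [show ("\n" : String).toList = ['\n'] from rfl]
      rw [← pvCore text.toList prefix_.toList]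
      simp [List.flatMap_map, Function.comp, String.toList_append, String.toList_ofList]
  | true =>
      simp only [if_pos]
      simp only [PySem.Str.join, String.toList_ofList, List.map_cons, List.map_map,
        String.toList_append, hrep]
      rw [pvJoin_cons]
      rw [show ("\n" : String).toList = ['\n'] from rfl]
      rw [← pvCore text.toList prefix_.toList]
      simp [List.flatMap_map, Function.comp, String.toList_append, String.toList_ofList]
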